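-- pv_equiv track=rewrite | github.com/Dopiz/Codility-Lessons | Lesson 7 - Stone Wall.py | solution
-- ===== SOURCE A (Python) =====
-- def solution(H: list):
--     stack = list()
--     stone = 0
--     for idx in range(len(H)):
--         while stack and stack[-1] > H[idx]:
--             stack.pop()
--         if not stack or stack[-1] < H[idx]:
--             stack.append(H[idx])
--             stone += 1
--     return stone
-- ===== SOURCE B (Python) =====
-- def _new_block(prev, x):
--     # prev: earlier heights in order seen; scan most recent first until the
--     # first height not exceeding x: a new block is needed unless it equals x
--     for h in reversed(prev):
--         if h > x:
--             continue
--         return h != x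
--     return True
--
-- def solution(H: list):
--     total = 0
--     prev = []
--     for x in H:
--         if _new_block(prev, x):
--             total += 1
--         prev.append(x)
--     return total
-- ===== Notes on version B (the rewrite author's own statement) =====
-- stated objective: alternative
-- what changed: Replaces the monotonic stack with a stackless per-element backward scan over the already-seen heights (most recent first): a block is counted unless the first earlier height not exceeding the current one equals it.
import Mathlib
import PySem

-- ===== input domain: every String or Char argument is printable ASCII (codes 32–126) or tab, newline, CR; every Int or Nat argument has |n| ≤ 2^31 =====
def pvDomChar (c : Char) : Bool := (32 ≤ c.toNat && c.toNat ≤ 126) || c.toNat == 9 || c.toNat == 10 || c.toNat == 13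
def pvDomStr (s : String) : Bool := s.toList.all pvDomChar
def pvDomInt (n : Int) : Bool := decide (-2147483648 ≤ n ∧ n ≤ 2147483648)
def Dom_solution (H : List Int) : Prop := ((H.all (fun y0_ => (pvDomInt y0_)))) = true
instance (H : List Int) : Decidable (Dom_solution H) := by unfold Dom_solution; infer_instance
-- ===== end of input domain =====

-- B replaces A's monotonic stack with a stackless per-element backward scan over the
-- previously seen heights (objective: alternative decomposition, same results).

-- ===== PORT A =====
-- A's stack (append/pop at the end) is represented head-as-top; the while-pop loop is dropWhile.
def solution (H : List Int) : Int :=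
  (H.foldl (fun (st : List Int × Int) x =>
    let stack := st.1.dropWhile (fun v => decide (v > x))
    match stack with
    | [] => (x :: stack, st.2 + 1)
    | top :: _ => if top < x then (x :: stack, st.2 + 1) else (stack, st.2))
  ([], 0)).2

-- ===== PORT B =====
-- prev: earlier heights in order seen; Source B scans reversed(prev), i.e. most recent first.
def newBlock (prev : List Int) (x : Int) : Bool :=
  match prev with
  | [] => true
  | h :: t => if h > x then newBlock t x else decide (h ≠ x)

def solution_alt (H : List Int) : Int :=
  (H.foldl (fun (st : List Int × Int) x =>
    (st.1 ++ [x], if newBlock st.1.reverse x then st.2 + 1 else st.2))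
  ([], 0)).2

-- ===== PRECONDITION & SPEC =====
def Spec_solution (H : List Int) (out : Int) : Prop := out = solution_alt H
instance (H : List Int) (out : Int) : Decidable (Spec_solution H out) := by unfold Spec_solution; infer_instance

-- ===== CLAIM (what is proved, stated in full; the proofs are below) =====
def Claim_equal_solution : Prop := ∀ (H : List Int), Dom_solution H → Spec_solution H (solution H)

-- ===== LEMMAS AND PROOFS =====

-- A's per-element stack update, as a function of the stack alone.
def stepA (x : Int) (s : List Int) : List Int :=
  let stack := s.dropWhile (fun v => decide (v > x))
  match stack with
  | [] => x :: stack
  | top :: _ => if top < x then x :: stack else stack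

-- Does A push (and count) at element x given stack s?
def pushCond (x : Int) (s : List Int) : Bool :=
  match s.dropWhile (fun v => decide (v > x)) with
  | [] => true
  | top :: _ => decide (top < x)

-- the stack A holds after processing the reversed prefix rp (most recent first)
def stackOf (rp : List Int) : List Int :=
  match rp with
  | [] => []
  | h :: t => stepA h (stackOf t)

theorem dropWhile_gt_gt (x h : Int) (hx : x < h) (l : List Int) :
    (l.dropWhile (fun v => decide (v > h))).dropWhile (fun v => decide (v > x))
      = l.dropWhile (fun v => decide (v > x)) := by
  induction l with
  | nil => simp
  | cons a t ih =>
    by_cases hah : a > h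
    · have hax : a > x := lt_trans hx hah
      simp [List.dropWhile, hah, hax, ih]
    · simp [List.dropWhile, hah]

theorem head_dropWhile_false {α : Type} (p : α → Bool) (l : List α) (a : α) (t : List α)
    (h : l.dropWhile p = a :: t) : p a = false := by
  induction l with
  | nil => simp at h
  | cons b u ih =>
    by_cases hb : p b = true
    · exact ih (by simpa [List.dropWhile, hb] using h)
    · simp [List.dropWhile, hb] at h
      simp [← h.1, Bool.eq_false_iff.mpr hb]

theorem decide_lt_eq_ne (h x : Int) (hle : h ≤ x) : decide (h < x) = decide (h ≠ x) := by
  simp only [decide_eq_decide]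
  omega

theorem key (rp : List Int) (x : Int) : pushCond x (stackOf rp) = newBlock rp x := by
  induction rp with
  | nil => simp [stackOf, pushCond, newBlock]
  | cons h t ih =>
    show pushCond x (stepA h (stackOf t)) = newBlock (h :: t) x
    by_cases hhx : h > x
    · -- the whole step at h gets dropped again when scanning with threshold x
      have hcomp := dropWhile_gt_gt x h hhx (stackOf t)
      have hdw : (stepA h (stackOf t)).dropWhile (fun v => decide (v > x))
          = (stackOf t).dropWhile (fun v => decide (v > x)) := by
        unfold stepA
        rcases hs : (stackOf t).dropWhile (fun v => decide (v > h)) with _ | ⟨top, rest⟩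
        · rw [hs] at hcomp
          simpa [List.dropWhile, hhx] using hcomp
        · rw [hs] at hcomp
          by_cases htop : top < h
          · simpa [htop, List.dropWhile, hhx] using hcomp
          · simpa [htop] using hcomp
      simp [pushCond, hdw, newBlock, hhx]
      exact ih
    · -- h ≤ x: the scan stops right at h (the top of A's stack is h)
      have hle : h ≤ x := le_of_not_gt hhx
      have hgoal : pushCond x (stepA h (stackOf t)) = decide (h ≠ x) := by
        unfold stepA
        rcases hs : (stackOf t).dropWhile (fun v => decide (v > h)) with _ | ⟨top, rest⟩
        · simp only [pushCond, List.dropWhile, hhx, decide_false]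
          simpa [List.dropWhile, hhx] using decide_lt_eq_ne h x hle
        · have htoph : ¬ (top > h) := by
            have := head_dropWhile_false (fun v => decide (v > h)) (stackOf t) top rest hs
            simpa using this
          by_cases htop : top < h
          · simp only [htop, if_true, pushCond]
            simpa [List.dropWhile, hhx] using decide_lt_eq_ne h x hle
          · have htopeq : top = h := le_antisymm (le_of_not_gt htoph) (le_of_not_gt htop)
            have htx : ¬ (top > x) := by omega
            simp only [pushCond, htopeq]
            simpa [List.dropWhile, hhx] using decide_lt_eq_ne h x hle
      rw [hgoal]
      simp [newBlock, hhx]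

theorem fold_eq (H : List Int) : ∀ (p : List Int) (n : Int),
    (H.foldl (fun (st : List Int × Int) x =>
      let stack := st.1.dropWhile (fun v => decide (v > x))
      match stack with
      | [] => (x :: stack, st.2 + 1)
      | top :: _ => if top < x then (x :: stack, st.2 + 1) else (stack, st.2))
      (stackOf p.reverse, n)).2
    = (H.foldl (fun (st : List Int × Int) x =>
      (st.1 ++ [x], if newBlock st.1.reverse x then st.2 + 1 else st.2)) (p, n)).2 := by
  induction H with
  | nil => intro p n; simp
  | cons x t ih =>
    intro p n
    have hstack : (fun (st : List Int × Int) x =>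
        let stack := st.1.dropWhile (fun v => decide (v > x))
        match stack with
        | [] => (x :: stack, st.2 + 1)
        | top :: _ => if top < x then (x :: stack, st.2 + 1) else (stack, st.2))
        (stackOf p.reverse, n) x
        = (stackOf ((p ++ [x]).reverse), if newBlock p.reverse x then n + 1 else n) := by
      have hrev : (p ++ [x]).reverse = x :: p.reverse := by simp
      rw [hrev]
      show _ = (stepA x (stackOf p.reverse), _)
      rw [← key p.reverse x]
      unfold stepA pushCond
      rcases hs : (stackOf p.reverse).dropWhile (fun v => decide (v > x)) with _ | ⟨top, rest⟩
      · simp [hs]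
      · by_cases htop : top < x <;> simp [hs, htop]
    simp only [List.foldl_cons, hstack]
    exact ih (p ++ [x]) _
theorem solution_eq_alt (H : List Int) : solution H = solution_alt H := by
  unfold solution solution_alt
  have := fold_eq H [] 0
  simpa [stackOf] using this

-- ===== VERDICT (by name: the statement is the Claim_ definition above) =====
theorem solution_spec : Claim_equal_solution := by
  intro H _
  unfold Spec_solution
  exact solution_eq_alt H
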